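-- pv_equiv track=rewrite | github.com/tim-andes/nc-read | nasa_api_curl.py | parse_granule_selection
-- ===== SOURCE A (Python) =====
-- def parse_granule_selection(input_str, max_index):
--     """
--     Parses a string of indices and ranges (e.g., '1,3,5-7') into a set of unique integers.
--     """
--     selected_indices = set()
--     parts = [part.strip() for part in input_str.split(',')]
--
--     for part in parts:
--         if '-' in part:
--             # Handle range (e.g., 5-7)
--             try:
--                 start, end = map(int, part.split('-'))
--                 if start > end:
--                     start, end = end, start # Handle backward ranges like 7-5
--
--                 # Check for bounds and add indices (1-based)
--                 for i in range(start, end + 1):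
--                     if 1 <= i <= max_index:
--                         selected_indices.add(i)
--             except ValueError:
--                 # Ignore invalid range parts
--                 continue
--         else:
--             # Handle single index (e.g., 3)
--             try:
--                 index = int(part)
--                 # Check for bounds and add index (1-based)
--                 if 1 <= index <= max_index:
--                     selected_indices.add(index)
--             except ValueError:
--                 # Ignore invalid single index parts
--                 continue
--
--     # Return as a sorted list
--     return sorted(list(selected_indices))
-- ===== SOURCE B (Python) =====
-- def parse_granule_selection(input_str, max_index):
--     """
--     Interval-sweep reimplementation: each comma part becomes one interval
--     clipped to [1, max_index]; the intervals are sorted by lower end and swept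
--     once with a cursor that emits every selected index exactly once in
--     increasing order -- no set, no per-element dedup, no sort of indices.
--     """
--     intervals = []
--     for part in input_str.split(','):
--         part = part.strip()
--         if '-' in part:
--             pieces = part.split('-')
--             if len(pieces) != 2:
--                 continue
--             try:
--                 lo, hi = int(pieces[0]), int(pieces[1])
--             except ValueError:
--                 continue
--             if lo > hi:
--                 lo, hi = hi, lo
--         else:
--             try:
--                 lo = hi = int(part)
--             except ValueError:
--                 continue
--         lo, hi = max(lo, 1), min(hi, max_index)
--         if lo <= hi:
--             intervals.append((lo, hi))
--     intervals.sort(key=lambda iv: iv[0])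
--     result = []
--     for lo, hi in intervals:
--         if result:
--             lo = max(lo, result[-1] + 1)
--         result.extend(range(lo, hi + 1))
--     return result
-- ===== Notes on version B (the rewrite author's own statement) =====
-- stated objective: alternative
-- what changed: B never builds a set of indices: each comma part becomes one interval clipped to [1, max_index], the intervals (not the indices) are sorted by lower end, and a single cursor sweep over the sorted intervals emits every selected index once in increasing order, so element-level dedup and the sort of the indices disappear.
import Mathlib
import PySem

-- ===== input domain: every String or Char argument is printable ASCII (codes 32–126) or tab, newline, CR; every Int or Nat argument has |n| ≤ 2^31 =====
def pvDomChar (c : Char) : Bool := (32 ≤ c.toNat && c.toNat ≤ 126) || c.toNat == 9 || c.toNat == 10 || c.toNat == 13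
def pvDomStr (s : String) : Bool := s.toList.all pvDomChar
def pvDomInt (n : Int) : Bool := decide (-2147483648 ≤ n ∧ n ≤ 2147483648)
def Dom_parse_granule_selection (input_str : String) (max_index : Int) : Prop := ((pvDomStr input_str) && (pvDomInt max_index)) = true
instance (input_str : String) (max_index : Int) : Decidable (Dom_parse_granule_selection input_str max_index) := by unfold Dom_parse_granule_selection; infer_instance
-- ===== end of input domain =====

-- B replaces A's set-and-sorted() pipeline by an interval sweep: each part becomes one
-- interval clipped to [1, max_index], the intervals are sorted by lower end and a cursor
-- sweep emits the selected indices once, in order; objective: alternative decomposition.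

-- ===== PORT A =====
-- s.split(sep) with the literal nonempty sep ',' / '-': Str.split? is always 'some', '.getD []' just unwraps it.
-- 'start, end = map(int, part.split('-'))' succeeds (no ValueError) iff the split has exactly
-- two pieces and both parse as int; any failure mode raises ValueError, caught by A's 'continue'.
def pgsRangeA? (part : String) : Option (Int × Int) :=
  match ((PySem.Str.split? part "-").getD []) with
  | [a, b] =>
    match PySem.Int.ofStr? a, PySem.Int.ofStr? b with
    | some s0, some e0 => some (s0, e0)
    | _, _ => none
  | _ => none

def pgsStepA (max_index : Int) (S : PySem.Set Int) (part : String) : PySem.Set Int :=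
  if PySem.Str.isIn "-" part then
    match pgsRangeA? part with
    | some (s0, e0) =>
      let p := if s0 > e0 then (e0, s0) else (s0, e0)
      (PySem.List.pyRange p.1 (p.2 + 1) 1).foldl
        (fun S i => if 1 ≤ i ∧ i ≤ max_index then PySem.Set.add S i else S) S
    | none => S
  else
    match PySem.Int.ofStr? part with
    | some idx => if 1 ≤ idx ∧ idx ≤ max_index then PySem.Set.add S idx else S
    | none => S

def parse_granule_selection (input_str : String) (max_index : Int) : List Int :=
  let parts := (((PySem.Str.split? input_str ",").getD [])).map PySem.Str.strip
  let selected := parts.foldl (pgsStepA max_index) PySem.Set.empty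
  PySem.List.sorted selected (fun x => x) false

-- ===== PORT B =====
-- the 'lo, hi' a part yields before clipping: a range part gives its (swapped-if-backward)
-- endpoints, a single index i gives (i, i); none = the part is skipped ('continue').
def pgsInterval? (part : String) : Option (Int × Int) :=
  if PySem.Str.isIn "-" part then
    match ((PySem.Str.split? part "-").getD []) with
    | [a, b] =>
      match PySem.Int.ofStr? a, PySem.Int.ofStr? b with
      | some lo, some hi => some (if lo > hi then (hi, lo) else (lo, hi))
      | _, _ => none
    | _ => none
  else
    match PySem.Int.ofStr? part with
    | some i => some (i, i)
    | none => none

-- 'lo, hi = max(lo, 1), min(hi, max_index); if lo <= hi: intervals.append((lo, hi))'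
def pgsClip (max_index : Int) (acc : List (Int × Int)) (part : String) : List (Int × Int) :=
  match pgsInterval? part with
  | none => acc
  | some (lo, hi) =>
    if max lo 1 ≤ min hi max_index then acc ++ [(max lo 1, min hi max_index)] else acc

-- the sweep body: 'if result: lo = max(lo, result[-1] + 1); result.extend(range(lo, hi + 1))'
def pgsEmit (res : List Int) (p : Int × Int) : List Int :=
  let lo := match res.getLast? with
    | some last => max p.1 (last + 1)
    | none => p.1
  res ++ PySem.List.pyRange lo (p.2 + 1) 1

def parse_granule_selection_alt (input_str : String) (max_index : Int) : List Int :=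
  let intervals := ((PySem.Str.split? input_str ",").getD []).foldl
    (fun acc part => pgsClip max_index acc (PySem.Str.strip part)) []
  let intervals := PySem.List.sorted intervals (fun iv => iv.1) false
  intervals.foldl pgsEmit []

-- ===== PRECONDITION & SPEC =====
def Spec_parse_granule_selection (input_str : String) (max_index : Int) (out : List Int) : Prop := out = parse_granule_selection_alt input_str max_index
instance (input_str : String) (max_index : Int) (out : List Int) : Decidable (Spec_parse_granule_selection input_str max_index out) := by unfold Spec_parse_granule_selection; infer_instance

-- ===== CLAIM (what is proved, stated in full; the proofs are below) =====
def Claim_equal_parse_granule_selection : Prop := ∀ (input_str : String) (max_index : Int), Dom_parse_granule_selection input_str max_index → Spec_parse_granule_selection input_str max_index (parse_granule_selection input_str max_index)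

-- ===== LEMMAS AND PROOFS =====

-- x is covered by one of the intervals
def pgsInIvs (ivs : List (Int × Int)) (x : Int) : Prop := ∃ p ∈ ivs, p.1 ≤ x ∧ x ≤ p.2

-- the loop invariant: A's set has exactly the members covered by B's interval list
def pgsInv (S : PySem.Set Int) (ivs : List (Int × Int)) : Prop :=
  S.Nodup ∧ (∀ x : Int, x ∈ S ↔ pgsInIvs ivs x)

-- guarded foldl = foldl over the filtered list
theorem foldl_if_eq_foldl_filter {α β : Type} (p : α → Prop) [DecidablePred p]
    (f : β → α → β) (l : List α) (init : β) :
    l.foldl (fun acc x => if p x then f acc x else acc) init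
      = (l.filter (fun x => decide (p x))).foldl f init := by
  induction l generalizing init with
  | nil => rfl
  | cons a t ih =>
    by_cases h : p a <;> simp [h, ih]

-- two strictly increasing Int lists with the same members are equal
theorem eq_of_pairwise_lt_of_mem_iff (l₁ l₂ : List Int)
    (h₁ : l₁.Pairwise (· < ·)) (h₂ : l₂.Pairwise (· < ·))
    (hm : ∀ x, x ∈ l₁ ↔ x ∈ l₂) : l₁ = l₂ := by
  have nd₁ : l₁.Nodup := h₁.imp ne_of_lt
  have nd₂ : l₂.Nodup := h₂.imp ne_of_lt
  have p : l₁.Perm l₂ := (List.perm_ext_iff_of_nodup nd₁ nd₂).mpr hm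
  exact p.eq_of_pairwise (fun a b _ _ hab hba => absurd hba (lt_asymm hab)) h₁ h₂

-- the clipped range is exactly the guarded range
theorem filter_pyRange_clip (a b mx : Int) :
    (PySem.List.pyRange a (b + 1) 1).filter (fun i => decide (1 ≤ i ∧ i ≤ mx))
      = PySem.List.pyRange (max a 1) (min b mx + 1) 1 := by
  refine eq_of_pairwise_lt_of_mem_iff _ _
    ((PySem.List.pairwise_lt_pyRange_one a (b + 1)).filter _)
    (PySem.List.pairwise_lt_pyRange_one _ _) ?_
  intro x
  simp only [List.mem_filter, PySem.List.mem_pyRange_one, decide_eq_true_eq]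
  omega

theorem mem_foldl_add (l : List Int) :
    ∀ (S : PySem.Set Int) (x : Int), x ∈ l.foldl PySem.Set.add S ↔ x ∈ S ∨ x ∈ l := by
  induction l with
  | nil => intro S x; simp
  | cons a t ih =>
    intro S x
    rw [List.foldl_cons, ih, PySem.Set.mem_add]
    simp [or_assoc, or_comm (a := x = a)]

theorem nodup_foldl_add (l : List Int) :
    ∀ (S : PySem.Set Int), S.Nodup → (l.foldl PySem.Set.add S).Nodup := by
  induction l with
  | nil => intro S h; exact h
  | cons a t ih => intro S h; exact ih _ (PySem.Set.nodup_add S a h)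

theorem pgsInIvs_append (ivs : List (Int × Int)) (q : Int × Int) (x : Int) :
    pgsInIvs (ivs ++ [q]) x ↔ pgsInIvs ivs x ∨ (q.1 ≤ x ∧ x ≤ q.2) := by
  unfold pgsInIvs
  simp [List.mem_append, or_and_right, exists_or]

-- one part preserves the invariant
theorem pgsInv_part (mx : Int) (S : PySem.Set Int) (ivs : List (Int × Int)) (part : String)
    (h : pgsInv S ivs) :
    pgsInv (pgsStepA mx S part) (pgsClip mx ivs part) := by
  obtain ⟨hnd, hmem⟩ := h
  unfold pgsStepA pgsClip pgsInterval? pgsRangeA?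
  by_cases hin : PySem.Str.isIn "-" part = true
  · simp only [hin, if_true]
    rcases hsplit : (PySem.Str.split? part "-").getD [] with _ | ⟨sa, _ | ⟨sb, _ | ⟨c, rest⟩⟩⟩ <;>
      simp only []
    · exact ⟨hnd, hmem⟩
    · exact ⟨hnd, hmem⟩
    · rcases hA : PySem.Int.ofStr? sa with _ | s0 <;> rcases hB : PySem.Int.ofStr? sb with _ | e0 <;>
        simp only []
      · exact ⟨hnd, hmem⟩
      · exact ⟨hnd, hmem⟩
      · exact ⟨hnd, hmem⟩
      · -- the (possibly swapped) endpoints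
        set lo := if s0 > e0 then e0 else s0 with hlo
        set hi := if s0 > e0 then s0 else e0 with hhi
        have hfold :
            ((if s0 > e0 then (e0, s0) else (s0, e0)) : Int × Int) = (lo, hi) := by
          by_cases hsw : s0 > e0 <;> simp [hlo, hhi, hsw]
        rw [hfold]
        simp only []
        rw [foldl_if_eq_foldl_filter (fun i => 1 ≤ i ∧ i ≤ mx) PySem.Set.add _ S,
          filter_pyRange_clip]
        refine ⟨nodup_foldl_add _ S hnd, ?_⟩
        intro x
        rw [mem_foldl_add, hmem x, PySem.List.mem_pyRange_one]
        by_cases hne : max lo 1 ≤ min hi mx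
        · rw [if_pos hne, pgsInIvs_append]
          constructor
          · rintro (h | h); · exact Or.inl h
            · exact Or.inr ⟨by simpa using h.1, by have := h.2; omega⟩
          · rintro (h | h); · exact Or.inl h
            · exact Or.inr ⟨by simpa using h.1, by have := h.2; omega⟩
        · rw [if_neg hne]
          constructor
          · rintro (h | h); · exact h
            · exact absurd (le_of_lt (lt_of_le_of_lt h.1 (by omega))) (by omega)
          · exact Or.inl
    · exact ⟨hnd, hmem⟩
  · simp only [Bool.not_eq_true] at hin
    simp only [hin, Bool.false_eq_true, if_false]
    rcases hA : PySem.Int.ofStr? part with _ | idx <;> simp only []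
    · exact ⟨hnd, hmem⟩
    · by_cases hg : 1 ≤ idx ∧ idx ≤ mx
      · rw [if_pos hg, if_pos (by omega)]
        refine ⟨PySem.Set.nodup_add S idx hnd, ?_⟩
        intro x
        rw [PySem.Set.mem_add, hmem x, pgsInIvs_append]
        constructor
        · rintro (h | h); · exact Or.inl h
          · exact Or.inr ⟨by omega, by omega⟩
        · rintro (h | h); · exact Or.inl h
          · simp only [] at h; exact Or.inr (by omega)
      · rw [if_neg hg, if_neg (by omega)]
        exact ⟨hnd, hmem⟩

theorem pgsInv_parts (mx : Int) (parts : List String) :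
    ∀ (S : PySem.Set Int) (ivs : List (Int × Int)), pgsInv S ivs →
    pgsInv (parts.foldl (fun S p => pgsStepA mx S (PySem.Str.strip p)) S)
           (parts.foldl (fun acc p => pgsClip mx acc (PySem.Str.strip p)) ivs) := by
  induction parts with
  | nil => intro S ivs h; exact h
  | cons p t ih =>
    intro S ivs h
    rw [List.foldl_cons, List.foldl_cons]
    exact ih _ _ (pgsInv_part mx S ivs _ h)

-- in a strictly increasing list every member is at most the last element
theorem mem_le_getLast : ∀ (res : List Int), res.Pairwise (· < ·) →
    ∀ x ∈ res, ∀ last, res.getLast? = some last → x ≤ last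
  | [], _ => by intro x hx; cases hx
  | [a], _ => by intro x hx last hl; simp at hx hl; omega
  | a :: b :: t, h => by
    intro x hx last hl
    have hl' : (b :: t).getLast? = some last := by
      rw [List.getLast?_cons_cons] at hl; exact hl
    rcases List.mem_cons.mp hx with rfl | hx
    · have hb : last ∈ b :: t := List.mem_of_getLast? hl'
      exact le_of_lt ((List.pairwise_cons.mp h).1 last hb)
    · exact mem_le_getLast (b :: t) (List.Pairwise.of_cons h) x hx last hl'

-- the sweep over lo-sorted intervals: strictly increasing output whose members are
-- the old members plus everything the intervals cover
theorem pgsEmit_fold (L : List (Int × Int)) :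
    ∀ (res : List Int),
    res.Pairwise (· < ·) →
    L.Pairwise (fun a b => a.1 ≤ b.1) →
    (∀ p ∈ L, ∀ x last, res.getLast? = some last → p.1 ≤ x → x ≤ last → x ∈ res) →
    (L.foldl pgsEmit res).Pairwise (· < ·) ∧
    (∀ x, x ∈ L.foldl pgsEmit res ↔ x ∈ res ∨ pgsInIvs L x) := by
  induction L with
  | nil =>
    intro res hres _ _
    exact ⟨hres, fun x => by simp [pgsInIvs]⟩
  | cons p t ih =>
    intro res hres hL hcov
    rw [List.foldl_cons]
    -- the start of the emitted range
    have hstep : pgsEmit res p = res ++ PySem.List.pyRange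
        (match res.getLast? with | some last => max p.1 (last + 1) | none => p.1)
        (p.2 + 1) 1 := rfl
    set lo := (match res.getLast? with
      | some last => max p.1 (last + 1) | none => p.1) with hlo
    -- facts about the new accumulator res' = res ++ range
    have hlo_ge : p.1 ≤ lo := by
      rw [hlo]; rcases res.getLast? with _ | last <;> simp
    have hlo_gt : ∀ last, res.getLast? = some last → last < lo := by
      intro last hlast; rw [hlo, hlast]; show last < max p.1 (last + 1); omega
    have hres' : (pgsEmit res p).Pairwise (· < ·) := by
      rw [hstep, List.pairwise_append]
      refine ⟨hres, PySem.List.pairwise_lt_pyRange_one _ _, ?_⟩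
      intro a ha b hb
      rcases hlast : res.getLast? with _ | last
      · rw [List.getLast?_eq_none_iff] at hlast; subst hlast; cases ha
      · have h1 := mem_le_getLast res hres a ha last hlast
        have h2 := (PySem.List.mem_pyRange_one.mp hb).1
        have h3 := hlo_gt last hlast
        omega
    -- membership in res' = res ∪ [p.1, p.2]
    have hmem' : ∀ x, x ∈ pgsEmit res p ↔ x ∈ res ∨ (p.1 ≤ x ∧ x ≤ p.2) := by
      intro x
      rw [hstep, List.mem_append, PySem.List.mem_pyRange_one]
      constructor
      · rintro (h | h); · exact Or.inl h
        · exact Or.inr ⟨le_trans hlo_ge h.1, by omega⟩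
      · rintro (h | h); · exact Or.inl h
        · by_cases hge : lo ≤ x
          · exact Or.inr ⟨hge, by omega⟩
          · -- x < lo: x is at most the old last, hence covered already
            left
            rcases hlast : res.getLast? with _ | last
            · rw [hlo, hlast] at hge; simp at hge; omega
            · refine hcov p List.mem_cons_self x last hlast h.1 ?_
              rw [hlo, hlast] at hge; simp at hge; omega
    -- the last element of res' for the coverage hypothesis of the tail
    have hcov' : ∀ q ∈ t, ∀ x last', (pgsEmit res p).getLast? = some last' →
        q.1 ≤ x → x ≤ last' → x ∈ pgsEmit res p := by
      intro q hq x last' hlast' hqx hxl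
      have hq1 : p.1 ≤ q.1 := (List.pairwise_cons.mp hL).1 q hq
      have hlm : last' ∈ pgsEmit res p := List.mem_of_getLast? hlast'
      rw [hmem' x]
      by_cases hxin : x ∈ res
      · exact Or.inl hxin
      · right
        refine ⟨le_trans hq1 hqx, ?_⟩
        -- last' ≤ p.2 or last' ∈ res; in the latter case x would be in res
        rcases (hmem' last').mp hlm with hlr | hlr
        · exfalso
          rcases hlast : res.getLast? with _ | last
          · rw [List.getLast?_eq_none_iff] at hlast; subst hlast; cases hlr
          · have := mem_le_getLast res hres last' hlr last hlast
            exact hxin (hcov p List.mem_cons_self x last hlast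
              (le_trans hq1 hqx) (by omega))
        · omega
    obtain ⟨hP, hM⟩ := ih (pgsEmit res p) hres' (List.Pairwise.of_cons hL) hcov'
    refine ⟨hP, fun x => ?_⟩
    rw [hM x, hmem' x]
    unfold pgsInIvs
    simp only [List.mem_cons, exists_eq_or_imp]
    tauto

-- assembling both sides from the shared interval list
theorem pgsFinal (S : PySem.Set Int) (ivs : List (Int × Int)) (h : pgsInv S ivs) :
    PySem.List.sorted S (fun x => x) false
      = (PySem.List.sorted ivs (fun iv => iv.1) false).foldl pgsEmit [] := by
  obtain ⟨hnd, hmem⟩ := h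
  obtain ⟨hP, hM⟩ := pgsEmit_fold (PySem.List.sorted ivs (fun iv => iv.1) false) []
    List.Pairwise.nil (PySem.List.sorted_pairwise ivs (fun iv => iv.1))
    (by rintro q hq x last ⟨⟩)
  refine PySem.List.sorted_eq_of_perm_of_pairwise_lt S _ _ ?_ hP
  refine (List.perm_ext_iff_of_nodup (hP.imp ne_of_lt) hnd).mpr ?_
  intro x
  rw [hM x, hmem x]
  unfold pgsInIvs
  simp [PySem.List.mem_sorted]

-- ===== VERDICT (by name: the statement is the Claim_ definition above) =====
theorem parse_granule_selection_spec : Claim_equal_parse_granule_selection := by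
  intro input_str max_index _
  unfold Spec_parse_granule_selection parse_granule_selection parse_granule_selection_alt
  simp only [List.foldl_map]
  exact pgsFinal _ _
    (pgsInv_parts max_index _ PySem.Set.empty [] ⟨List.nodup_nil, by simp [PySem.Set.empty, pgsInIvs]⟩)
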